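-- pv_equiv track=rewrite | github.com/tsackton/taelgar | _scripts/note_stats.py | remove_initial_callout
-- ===== SOURCE A (Python) =====
-- from typing import Iterable, List, Sequence, Tuple
--
-- def remove_initial_callout(lines: List[str]) -> List[str]:
--     trimmed = list(lines)
--     start = 0
--     while start < len(trimmed) and not trimmed[start].strip():
--         start += 1
--     if start < len(trimmed) and trimmed[start].lstrip().startswith(">"):
--         end = start
--         while end < len(trimmed):
--             stripped = trimmed[end].strip()
--             if stripped and not trimmed[end].lstrip().startswith(">"):
--                 break
--             end += 1
--         del trimmed[start:end]
--     return trimmed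
-- ===== SOURCE B (Python) =====
-- from typing import List
--
--
-- def _cls(line: str) -> int:
--     """0 = blank line, 1 = blockquote line, 2 = ordinary content line."""
--     t = line.lstrip()
--     if not t:
--         return 0
--     return 1 if t.startswith(">") else 2
--
--
-- def remove_initial_callout(lines: List[str]) -> List[str]:
--     out: List[str] = []
--     state = 0  # 0 = consuming leading blanks, 1 = inside callout, 2 = keep rest
--     for line in lines:
--         c = _cls(line)
--         if state == 0:
--             if c == 0:
--                 out.append(line)
--             elif c == 1:
--                 state = 1
--             else:
--                 state = 2
--                 out.append(line)
--         elif state == 1: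
--             if c == 2:
--                 state = 2
--                 out.append(line)
--             # blank or '>' lines inside the callout are dropped
--         else:
--             out.append(line)
--     return out
-- ===== Notes on version B (the rewrite author's own statement) =====
-- stated objective: alternative
-- what changed: B is a single-pass three-state machine that builds the output list directly (keep leading blanks, drop the callout run, keep the rest), instead of A's two index-scans that compute start/end and delete a slice from a copy.
import Mathlib
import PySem

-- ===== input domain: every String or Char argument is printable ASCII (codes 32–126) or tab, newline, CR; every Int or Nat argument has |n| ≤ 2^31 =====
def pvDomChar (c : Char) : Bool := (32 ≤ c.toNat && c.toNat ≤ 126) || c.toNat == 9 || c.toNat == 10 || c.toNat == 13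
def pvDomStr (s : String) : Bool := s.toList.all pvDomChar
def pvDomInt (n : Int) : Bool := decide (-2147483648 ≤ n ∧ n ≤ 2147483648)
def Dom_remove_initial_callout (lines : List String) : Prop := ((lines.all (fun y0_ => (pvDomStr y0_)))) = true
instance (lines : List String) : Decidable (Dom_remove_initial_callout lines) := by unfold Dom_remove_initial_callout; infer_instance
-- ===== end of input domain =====

-- B replaces A's two index-scans plus slice deletion by a single-pass three-state
-- machine that builds the output list directly (objective: alternative decomposition).

-- ===== PORT A =====
-- while start < len(trimmed) and not trimmed[start].strip(): start += 1
def aFindStart (trimmed : List String) (start : Nat) : Nat :=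
  if h : start < trimmed.length then
    if PySem.Str.strip trimmed[start] == "" then aFindStart trimmed (start + 1) else start
  else start
termination_by trimmed.length - start

def aFindEnd (trimmed : List String) (e : Nat) : Nat :=
  if h : e < trimmed.length then
    let stripped := PySem.Str.strip trimmed[e]
    if stripped != "" && !(PySem.Str.startswith (PySem.Str.lstrip trimmed[e]) ">") then e
    else aFindEnd trimmed (e + 1)
  else e
termination_by trimmed.length - e

-- while end < len(trimmed): stripped = …; break on a non-blank non-'>' line; end += 1  (above)
def remove_initial_callout (lines : List String) : List String :=
  let trimmed := lines
  let start := aFindStart trimmed 0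
  if h : start < trimmed.length then
    if PySem.Str.startswith (PySem.Str.lstrip trimmed[start]) ">" then
      let e := aFindEnd trimmed start
      trimmed.take start ++ trimmed.drop e
    else trimmed
  else trimmed

-- ===== PORT B =====
-- 0 = blank line, 1 = blockquote line, 2 = ordinary content line
def bCls (line : String) : Nat :=
  let t := PySem.Str.lstrip line
  if t == "" then 0
  else if PySem.Str.startswith t ">" then 1 else 2

def bStep (acc : Nat × List String) (line : String) : Nat × List String :=
  let c := bCls line
  if acc.1 == 0 then
    if c == 0 then (0, acc.2 ++ [line])
    else if c == 1 then (1, acc.2)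
    else (2, acc.2 ++ [line])
  else if acc.1 == 1 then
    if c == 2 then (2, acc.2 ++ [line]) else (1, acc.2)
  else (2, acc.2 ++ [line])

def remove_initial_callout_alt (lines : List String) : List String :=
  (lines.foldl bStep (0, [])).2


-- ===== PRECONDITION & SPEC =====
def Spec_remove_initial_callout (lines : List String) (out : List String) : Prop := out = remove_initial_callout_alt lines
instance (lines : List String) (out : List String) : Decidable (Spec_remove_initial_callout lines out) := by unfold Spec_remove_initial_callout; infer_instance

-- ===== CLAIM (what is proved, stated in full; the proofs are below) =====
def Claim_equal_remove_initial_callout : Prop := ∀ (lines : List String), Dom_remove_initial_callout lines → Spec_remove_initial_callout lines (remove_initial_callout lines)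

-- ===== LEMMAS AND PROOFS =====
theorem ofList_beq_empty (l : List Char) : (String.ofList l == "") = l.isEmpty := by
  rcases l with _ | ⟨c, t⟩
  · simp
  · simp [← String.toList_inj]

theorem strip_empty_iff_lstrip_empty (s : String) :
    (PySem.Str.strip s == "") = (PySem.Str.lstrip s == "") := by
  simp only [PySem.Str.strip, PySem.Str.lstrip, PySem.Chars.strip, PySem.Chars.rstrip,
    PySem.Chars.lstrip, ofList_beq_empty]
  rcases h : List.dropWhile PySem.Chars.isspace s.toList with _ | ⟨c, t⟩
  · simp
  · have hc : PySem.Chars.isspace c = false := by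
      have := List.head_dropWhile_not (p := PySem.Chars.isspace) (l := s.toList) (by simp [h])
      simpa [h] using this
    simp
    exact ⟨c, Or.inr rfl, hc⟩

def blankA (s : String) : Bool := PySem.Str.strip s == ""
def quoteA (s : String) : Bool := PySem.Str.startswith (PySem.Str.lstrip s) ">"
def bqA (s : String) : Bool := !(PySem.Str.strip s != "" && !(quoteA s))

theorem blankA_eq_bCls (s : String) : blankA s = (bCls s == 0) := by
  simp only [blankA, bCls, strip_empty_iff_lstrip_empty]
  split_ifs with h1 h2 <;> simp [h1]

theorem bqA_eq_bCls (s : String) : bqA s = (bCls s != 2) := by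
  simp only [bqA, bCls, quoteA]
  rw [show (PySem.Str.strip s != "") = (PySem.Str.lstrip s != "") by
    simp [bne, strip_empty_iff_lstrip_empty]]
  cases he : (PySem.Str.lstrip s == "") <;>
    cases hq : PySem.Str.startswith (PySem.Str.lstrip s) ">" <;> simp_all

theorem quoteA_of_bCls_one (s : String) (h : bCls s = 1) : quoteA s = true := by
  simp only [bCls] at h
  by_cases h1 : (PySem.Str.lstrip s == "") = true
  · simp [h1] at h
  · by_cases h2 : PySem.Str.startswith (PySem.Str.lstrip s) ">" = true
    · exact h2
    · simp [h1] at h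
      exact absurd h (by simpa [PySem.Str.startswith] using h2)

theorem quoteA_of_bCls_two (s : String) (h : bCls s = 2) : quoteA s = false := by
  simp only [bCls] at h
  by_cases h1 : (PySem.Str.lstrip s == "") = true
  · simp [h1] at h
  · by_cases h2 : PySem.Str.startswith (PySem.Str.lstrip s) ">" = true
    · simp [h1] at h
      exact absurd (by simpa [PySem.Str.startswith] using h2) (by simp [h])
    · exact Bool.eq_false_iff.mpr h2

theorem aFindStart_eq (l : List String) (s : Nat) :
    aFindStart l s = s + ((l.drop s).takeWhile blankA).length := by
  fun_induction aFindStart l s with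
  | case1 s h hb ih =>
    rw [List.drop_eq_getElem_cons h, ih, List.takeWhile_cons]
    simp [blankA, hb]
    omega
  | case2 s h hb =>
    rw [List.drop_eq_getElem_cons h]
    simp [List.takeWhile_cons, blankA, hb]
  | case3 s h =>
    have hd : List.drop s l = [] := List.drop_eq_nil_of_le (by omega)
    simp [hd]

theorem aFindEnd_eq (l : List String) (s : Nat) :
    aFindEnd l s = s + ((l.drop s).takeWhile bqA).length := by
  fun_induction aFindEnd l s with
  | case1 s h str hcond =>
    rw [List.drop_eq_getElem_cons h]
    have hc2 : (PySem.Str.strip l[s] != "" && !(PySem.Str.startswith (PySem.Str.lstrip l[s]) ">")) = true := hcond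
    have hbq : bqA l[s] = false := by simp only [bqA, quoteA, hc2]; rfl
    simp [List.takeWhile_cons, hbq]
  | case2 s h str hcond ih =>
    rw [List.drop_eq_getElem_cons h, ih, List.takeWhile_cons]
    have hc2 : (PySem.Str.strip l[s] != "" && !(PySem.Str.startswith (PySem.Str.lstrip l[s]) ">")) = false :=
      Bool.eq_false_iff.mpr hcond
    have hbq : bqA l[s] = true := by simp only [bqA, quoteA, hc2]; rfl
    simp [hbq]
    omega
  | case3 s h =>
    have hd : List.drop s l = [] := List.drop_eq_nil_of_le (by omega)
    simp [hd]

-- closed form of A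
theorem take_len_takeWhile (p : String → Bool) (l : List String) :
    l.take ((l.takeWhile p).length) = l.takeWhile p :=
  ((List.prefix_iff_eq_take.mp (List.takeWhile_prefix p)).symm)

theorem drop_len_takeWhile (p : String → Bool) (l : List String) :
    l.drop ((l.takeWhile p).length) = l.dropWhile p := by
  calc l.drop ((l.takeWhile p).length)
      = (l.takeWhile p ++ l.dropWhile p).drop ((l.takeWhile p).length) := by
        rw [List.takeWhile_append_dropWhile]
    _ = l.dropWhile p := List.drop_left

theorem A_of_nil (l : List String) (h : l.dropWhile blankA = []) :
    remove_initial_callout l = l := by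
  simp only [remove_initial_callout, aFindStart_eq, List.drop_zero, Nat.zero_add]
  have hlen : l.length = (l.takeWhile blankA).length := by
    conv_lhs => rw [← List.takeWhile_append_dropWhile (p := blankA) (l := l)]
    simp [h]
  rw [dif_neg (by omega)]

theorem A_of_cons (l : List String) (x : String) (xs : List String)
    (h : l.dropWhile blankA = x :: xs) :
    remove_initial_callout l =
      if quoteA x then l.takeWhile blankA ++ (x :: xs).dropWhile bqA else l := by
  simp only [remove_initial_callout, aFindStart_eq, List.drop_zero, Nat.zero_add]
  have hlen : l.length = (l.takeWhile blankA).length + (x :: xs).length := by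
    conv_lhs => rw [← List.takeWhile_append_dropWhile (p := blankA) (l := l)]
    simp [h]
  have hk : (l.takeWhile blankA).length < l.length := by simp at hlen; omega
  have hget : l[(l.takeWhile blankA).length]'hk = x := by
    have := drop_len_takeWhile blankA l
    rw [h] at this
    have h2 := List.drop_eq_getElem_cons hk
    rw [this] at h2
    exact (List.cons.injEq .. ▸ h2).1.symm
  rw [dif_pos hk, hget]
  by_cases hq : quoteA x
  · rw [if_pos (by simpa [quoteA] using hq), if_pos hq]
    rw [aFindEnd_eq, take_len_takeWhile]
    congr 1
    have hdk : List.drop ((l.takeWhile blankA).length) l = x :: xs :=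
      (drop_len_takeWhile blankA l).trans h
    rw [← List.drop_drop, hdk, drop_len_takeWhile]
  · rw [if_neg (by simpa [quoteA] using hq), if_neg hq]

-- recursive shape of B
def hRec : List String → List String
  | [] => []
  | x :: xs => if bCls x == 2 then x :: xs else hRec xs

def gRec : List String → List String
  | [] => []
  | x :: xs =>
    if bCls x == 0 then x :: gRec xs
    else if bCls x == 1 then hRec xs
    else x :: xs

theorem hRec_eq (l : List String) : hRec l = l.dropWhile bqA := by
  induction l with
  | nil => simp [hRec]
  | cons x xs ih =>
    rw [hRec, List.dropWhile_cons, bqA_eq_bCls]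
    rcases h : bCls x with _ | _ | n <;> simp [h, ih]

theorem foldl_bStep_two (l : List String) (out : List String) :
    List.foldl bStep (2, out) l = (2, out ++ l) := by
  induction l generalizing out with
  | nil => simp
  | cons x xs ih => simp [bStep, ih]

theorem foldl_bStep_one (l : List String) (out : List String) :
    (List.foldl bStep (1, out) l).2 = out ++ hRec l := by
  induction l generalizing out with
  | nil => simp [hRec]
  | cons x xs ih =>
    by_cases h : bCls x == 2
    · simp [List.foldl_cons, bStep, h, hRec, foldl_bStep_two]
    · simp [List.foldl_cons, bStep, h, hRec, ih]

theorem foldl_bStep_zero (l : List String) (out : List String) :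
    (List.foldl bStep (0, out) l).2 = out ++ gRec l := by
  induction l generalizing out with
  | nil => simp [gRec]
  | cons x xs ih =>
    rcases h : bCls x with _ | _ | n
    · simp [List.foldl_cons, bStep, h, gRec, ih]
    · simp [List.foldl_cons, bStep, h, gRec, foldl_bStep_one]
    · simp [List.foldl_cons, bStep, h, gRec, foldl_bStep_two]

theorem alt_eq_gRec (lines : List String) :
    remove_initial_callout_alt lines = gRec lines := by
  simpa using foldl_bStep_zero lines []

theorem A_eq_gRec (l : List String) : remove_initial_callout l = gRec l := by
  induction l with
  | nil => rfl
  | cons x xs ih =>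
    rcases hc : bCls x with _ | _ | n
    · -- blank
      have hb : blankA x = true := by rw [blankA_eq_bCls, hc]; rfl
      have hdw : (x :: xs).dropWhile blankA = xs.dropWhile blankA := by
        simp [List.dropWhile_cons, hb]
      have htw : (x :: xs).takeWhile blankA = x :: xs.takeWhile blankA := by
        simp [List.takeWhile_cons, hb]
      rw [gRec, if_pos (by simp [hc]), ← ih]
      rcases hx : xs.dropWhile blankA with _ | ⟨y, ys⟩
      · rw [A_of_nil _ (hdw.trans hx), A_of_nil _ hx]
      · rw [A_of_cons _ _ _ (hdw.trans hx), A_of_cons _ _ _ hx, htw]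
        by_cases hq : quoteA y <;> simp [hq]
    · -- quote
      have hb : blankA x = false := by rw [blankA_eq_bCls, hc]; rfl
      have hbq : bqA x = true := by rw [bqA_eq_bCls, hc]; rfl
      rw [A_of_cons (x :: xs) x xs (by simp [List.dropWhile_cons, hb])]
      rw [if_pos (quoteA_of_bCls_one x hc)]
      rw [gRec, if_neg (by simp [hc]), if_pos (by simp [hc]), hRec_eq]
      simp [List.takeWhile_cons, hb, List.dropWhile_cons, hbq]
    · -- content: bCls x = n+2; on strings bCls only takes 0,1,2 so n = 0
      have hn : n = 0 := by
        simp only [bCls] at hc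
        split_ifs at hc <;> omega
      subst hn
      have hb : blankA x = false := by rw [blankA_eq_bCls, hc]; rfl
      rw [A_of_cons (x :: xs) x xs (by simp [List.dropWhile_cons, hb])]
      rw [if_neg (by simp [quoteA_of_bCls_two x hc])]
      rw [gRec, if_neg (by simp [hc]), if_neg (by simp [hc])]

-- ===== VERDICT (by name: the statement is the Claim_ definition above) =====
theorem remove_initial_callout_spec : Claim_equal_remove_initial_callout := by
  intro lines _
  unfold Spec_remove_initial_callout
  rw [alt_eq_gRec, A_eq_gRec]
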